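-- pv_equiv track=rewrite | github.com/Arsen1302/Code-copy-detector | TestData/solutions/problem_1116_3.py | solution_1116_3
-- ===== SOURCE A (Python) =====
-- def solution_1116_3(s: str) -> int:
--     count = 0
--     stack = []
--     for c in s:
--         if c == 'b':
--             stack.append(c)
--         elif stack:
--             stack.pop()
--             count += 1
--     return count
-- ===== SOURCE B (Python) =====
-- def solution_1116_3(s: str) -> int:
--     bal = 0
--     minbal = 0
--     nonb = 0
--     for c in s:
--         if c == 'b':
--             bal += 1
--         else:
--             bal -= 1
--             nonb += 1
--         if bal < minbal:
--             minbal = bal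
--     return nonb + minbal
-- ===== Notes on version B (the rewrite author's own statement) =====
-- stated objective: alternative
-- what changed: Replaced the stack simulation with a single pass over three scalars (running balance, its running minimum, and the count of non-'b' chars), returning nonb + minbal by the identity: matched pairs = non-'b' count + minimum prefix balance.
import Mathlib
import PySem

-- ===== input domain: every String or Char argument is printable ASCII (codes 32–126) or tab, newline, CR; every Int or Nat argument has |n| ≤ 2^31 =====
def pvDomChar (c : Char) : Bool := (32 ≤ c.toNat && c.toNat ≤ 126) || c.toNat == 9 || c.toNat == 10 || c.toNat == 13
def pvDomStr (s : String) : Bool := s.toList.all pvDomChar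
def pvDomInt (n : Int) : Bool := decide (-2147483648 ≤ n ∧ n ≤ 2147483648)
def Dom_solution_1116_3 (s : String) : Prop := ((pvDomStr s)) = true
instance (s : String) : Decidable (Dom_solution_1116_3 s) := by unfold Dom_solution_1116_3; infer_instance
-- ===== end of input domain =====

-- B replaces A's stack simulation by three scalars (balance, its running minimum, non-'b' count); alternative decomposition, O(1) space.

-- ===== PORT A =====
-- step of A's loop: push 'b', else pop (drop last) and count, else nothing
def pvStepA (st : Int × List Char) (c : Char) : Int × List Char :=
  if c = 'b' then (st.1, st.2 ++ [c])
  else if st.2 ≠ [] then (st.1 + 1, st.2.dropLast)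
  else st

def solution_1116_3 (s : String) : Int :=
  (s.toList.foldl pvStepA (0, [])).1

-- ===== PORT B =====
-- step of B's loop over (bal, minbal, nonb)
def pvStepB (st : Int × Int × Int) (c : Char) : Int × Int × Int :=
  let bal := if c = 'b' then st.1 + 1 else st.1 - 1
  let nonb := if c = 'b' then st.2.2 else st.2.2 + 1
  let minbal := if bal < st.2.1 then bal else st.2.1
  (bal, minbal, nonb)

def solution_1116_3_alt (s : String) : Int :=
  let r := s.toList.foldl pvStepB (0, 0, 0)
  r.2.2 + r.2.1

-- ===== PRECONDITION & SPEC =====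
def Spec_solution_1116_3 (s : String) (out : Int) : Prop := out = solution_1116_3_alt s
instance (s : String) (out : Int) : Decidable (Spec_solution_1116_3 s out) := by unfold Spec_solution_1116_3; infer_instance

-- ===== CLAIM (what is proved, stated in full; the proofs are below) =====
def Claim_equal_solution_1116_3 : Prop := ∀ (s : String), Dom_solution_1116_3 s → Spec_solution_1116_3 s (solution_1116_3 s)

-- ===== LEMMAS AND PROOFS =====

-- invariant: stack length = bal - minbal and count = nonb + minbal; it is preserved by the two steps
theorem pv_key (l : List Char) : ∀ (count bal minbal nonb : Int) (stack : List Char),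
    (stack.length : Int) = bal - minbal → count = nonb + minbal →
    (l.foldl pvStepA (count, stack)).1 =
      (l.foldl pvStepB (bal, minbal, nonb)).2.2 + (l.foldl pvStepB (bal, minbal, nonb)).2.1 := by
  induction l with
  | nil => intro count bal minbal nonb stack h1 h2; simpa using h2
  | cons c t ih =>
    intro count bal minbal nonb stack h1 h2
    simp only [List.foldl_cons]
    by_cases hb : c = 'b'
    · subst hb
      have hmin : ¬ (bal + 1 < minbal) := by omega
      rw [show pvStepA (count, stack) 'b' = (count, stack ++ ['b']) from by simp [pvStepA],
          show pvStepB (bal, minbal, nonb) 'b' = (bal + 1, minbal, nonb) from by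
            simp [pvStepB, hmin]]
      exact ih count (bal + 1) minbal nonb (stack ++ ['b']) (by simp; omega) h2
    · by_cases hs : stack = []
      · have hlen : (stack.length : Int) = 0 := by simp [hs]
        have hmin : bal - 1 < minbal := by omega
        rw [show pvStepA (count, stack) c = (count, stack) from by simp [pvStepA, hb, hs],
            show pvStepB (bal, minbal, nonb) c = (bal - 1, bal - 1, nonb + 1) from by
              simp [pvStepB, hb, hmin]]
        rw [hs]
        exact ih count (bal - 1) (bal - 1) (nonb + 1) [] (by simp) (by omega)
      · have hlen : 1 ≤ stack.length := by
          cases stack with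
          | nil => exact absurd rfl hs
          | cons a b => simp
        have hmin : ¬ (bal - 1 < minbal) := by omega
        rw [show pvStepA (count, stack) c = (count + 1, stack.dropLast) from by
              simp [pvStepA, hb, hs],
            show pvStepB (bal, minbal, nonb) c = (bal - 1, minbal, nonb + 1) from by
              simp [pvStepB, hb, hmin]]
        exact ih (count + 1) (bal - 1) minbal (nonb + 1) stack.dropLast
          (by simp [List.length_dropLast]; omega) (by omega)

-- ===== VERDICT (by name: the statement is the Claim_ definition above) =====
theorem solution_1116_3_spec : Claim_equal_solution_1116_3 := by
  intro s _
  unfold Spec_solution_1116_3 solution_1116_3 solution_1116_3_alt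
  exact pv_key s.toList 0 0 0 0 [] (by simp) (by simp)
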